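-- pv_equiv track=rewrite | github.com/iveL91/Advent-of-Code-2019 | aoc_4_lib.py | strict_adjacent
-- ===== SOURCE A (Python) =====
-- def strict_adjacent(number: int) -> bool:
--     """"""
--     string = str(number)
--     adj: bool = False
--     pair_adj: bool = False
--     for i in range(len(string) - 1):
--         if not adj:
--             if string[i] == string[i + 1]:
--                 adj = True
--                 pair_adj = True
--         else:
--             if string[i] == string[i + 1]:
--                 adj = True
--                 pair_adj = False
--             elif not pair_adj:
--                 adj = False
--             else:
--                 break
--     return pair_adj
-- ===== SOURCE B (Python) =====
-- from itertools import groupby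
--
--
-- def strict_adjacent(number: int) -> bool:
--     """Run-length view: some maximal run of equal adjacent characters has length exactly 2."""
--     return any(sum(1 for _ in g) == 2 for _, g in groupby(str(number)))
-- ===== Notes on version B (the rewrite author's own statement) =====
-- stated objective: idiomatic
-- what changed: Replaced the two-flag state machine with early break by run-length grouping (itertools.groupby): materialize the maximal runs of equal adjacent characters of str(number) and return whether any run has length exactly 2.
import Mathlib
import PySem

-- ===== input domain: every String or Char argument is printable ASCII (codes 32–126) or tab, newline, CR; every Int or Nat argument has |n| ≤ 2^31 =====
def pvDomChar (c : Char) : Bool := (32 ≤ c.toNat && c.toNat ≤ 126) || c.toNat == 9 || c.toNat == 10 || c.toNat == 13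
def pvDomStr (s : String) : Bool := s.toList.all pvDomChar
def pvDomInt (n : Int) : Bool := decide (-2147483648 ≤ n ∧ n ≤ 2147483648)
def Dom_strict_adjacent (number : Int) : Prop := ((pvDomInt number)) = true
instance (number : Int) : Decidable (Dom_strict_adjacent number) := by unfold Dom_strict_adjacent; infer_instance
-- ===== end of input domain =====

-- B replaces A's two-flag state machine by run-length grouping (itertools.groupby):
-- does some maximal run of equal adjacent characters of str(number) have length exactly 2? (objective: idiomatic)

-- ===== PORT A =====
-- the for-loop over i in range(len(string)-1), carrying (adj, pair_adj); 'break' = return pair_adj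
def pvLoopA : List Char → Bool → Bool → Bool
  | x :: y :: rest, adj, pair_adj =>
    if !adj then
      if x == y then pvLoopA (y :: rest) true true
      else pvLoopA (y :: rest) adj pair_adj
    else
      if x == y then pvLoopA (y :: rest) true false
      else if !pair_adj then pvLoopA (y :: rest) false pair_adj
      else pair_adj
  | _, _, pair_adj => pair_adj

def strict_adjacent (number : Int) : Bool :=
  pvLoopA (PySem.Int.toStr number).toList false false

-- ===== PORT B =====
-- lengths of the maximal runs of equal adjacent characters (itertools.groupby)
def pvGroupLens : List Char → List Nat
  | [] => []
  | c :: rest =>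
    (1 + (rest.takeWhile (· == c)).length) :: pvGroupLens (rest.dropWhile (· == c))
  termination_by l => l.length
  decreasing_by
    simp only [List.length_cons]
    exact Nat.lt_succ_of_le (List.length_dropWhile_le _ _)

def strict_adjacent_alt (number : Int) : Bool :=
  (pvGroupLens (PySem.Int.toStr number).toList).any (fun k => k == 2)

-- ===== PRECONDITION & SPEC =====
def Spec_strict_adjacent (number : Int) (out : Bool) : Prop := out = strict_adjacent_alt number
instance (number : Int) (out : Bool) : Decidable (Spec_strict_adjacent number out) := by unfold Spec_strict_adjacent; infer_instance

-- ===== CLAIM (what is proved, stated in full; the proofs are below) =====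
def Claim_equal_strict_adjacent : Prop := ∀ (number : Int), Dom_strict_adjacent number → Spec_strict_adjacent number (strict_adjacent number)

-- ===== LEMMAS AND PROOFS =====

-- in state (adj = true, pair_adj = false) the loop skips the rest of the current run and resumes fresh
lemma pvLoopA_tf (x : Char) (rest : List Char) :
    pvLoopA (x :: rest) true false = pvLoopA (rest.dropWhile (· == x)) false false := by
  induction rest generalizing x with
  | nil => simp [pvLoopA]
  | cons y r ih =>
    by_cases h : x = y
    · subst h
      simpa [pvLoopA, List.dropWhile] using ih x
    · have hb : (x == y) = false := by simpa using h
      have hb' : (y == x) = false := by simpa using fun e => h e.symm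
      simp [pvLoopA, hb, hb', List.dropWhile]

theorem pvMain : ∀ c : List Char, pvLoopA c false false = (pvGroupLens c).any (fun k => k == 2)
  | [] => by simp [pvLoopA, pvGroupLens]
  | [x] => by simp [pvLoopA, pvGroupLens]
  | x :: y :: r => by
    by_cases h : x = y
    · subst h
      cases r with
      | nil => simp [pvLoopA, pvGroupLens]
      | cons z r' =>
        by_cases hz : x = z
        · subst hz
          have ih := pvMain (r'.dropWhile (· == x))
          simp [pvLoopA, pvGroupLens, List.takeWhile, List.dropWhile, pvLoopA_tf, ih]
          omega
        · have hb : (x == z) = false := by simpa using hz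
          have hb' : (z == x) = false := by simpa using fun e => hz e.symm
          simp [pvLoopA, pvGroupLens, List.takeWhile, List.dropWhile, hb, hb']
    · have hb : (x == y) = false := by simpa using h
      have hb' : (y == x) = false := by simpa using fun e => h e.symm
      have ih := pvMain (y :: r)
      simp [pvLoopA, pvGroupLens, List.takeWhile, List.dropWhile, hb, hb', ih]
  termination_by c => c.length
  decreasing_by
    all_goals simp only [List.length_cons]
    all_goals first
      | (have := List.length_dropWhile_le (· == x) r'; omega)
      | omega

-- ===== VERDICT (by name: the statement is the Claim_ definition above) =====
theorem strict_adjacent_spec : Claim_equal_strict_adjacent := by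
  intro n _
  unfold Spec_strict_adjacent strict_adjacent strict_adjacent_alt
  exact pvMain _
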